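-- pv_equiv track=rewrite | github.com/kimyoungjin06/regspec-machine | scripts/modeling/run_phase_b_bikard_machine_scientist_scan.py | _track_capacity_stats
-- ===== SOURCE A (Python) =====
-- from typing import Dict, List, Sequence, Tuple
--
-- def _track_capacity_stats(validation_track_capacity: Dict[str, Dict[str, int]]) -> Dict[str, int]:
--     if not validation_track_capacity:
--         return {
--             "n_tracks": 0,
--             "min_track_policy_docs_validation": 0,
--             "max_track_policy_docs_validation": 0,
--             "min_track_events_validation": 0,
--             "max_track_events_validation": 0,
--         }
--     docs = [int(cap.get("n_policy_docs_validation", 0)) for cap in validation_track_capacity.values()]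
--     events = [int(cap.get("n_events_validation", 0)) for cap in validation_track_capacity.values()]
--     return {
--         "n_tracks": int(len(validation_track_capacity)),
--         "min_track_policy_docs_validation": int(min(docs)),
--         "max_track_policy_docs_validation": int(max(docs)),
--         "min_track_events_validation": int(min(events)),
--         "max_track_events_validation": int(max(events)),
--     }
-- ===== SOURCE B (Python) =====
-- from typing import Dict
--
-- def _track_capacity_stats(validation_track_capacity: Dict[str, Dict[str, int]]) -> Dict[str, int]:
--     n = 0
--     acc = None
--     for cap in validation_track_capacity.values():
--         dv = int(cap.get("n_policy_docs_validation", 0))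
--         ev = int(cap.get("n_events_validation", 0))
--         if acc is None:
--             acc = (dv, dv, ev, ev)
--         else:
--             acc = (min(acc[0], dv), max(acc[1], dv), min(acc[2], ev), max(acc[3], ev))
--         n += 1
--     if acc is None:
--         return {
--             "n_tracks": 0,
--             "min_track_policy_docs_validation": 0,
--             "max_track_policy_docs_validation": 0,
--             "min_track_events_validation": 0,
--             "max_track_events_validation": 0,
--         }
--     return {
--         "n_tracks": n,
--         "min_track_policy_docs_validation": acc[0],
--         "max_track_policy_docs_validation": acc[1],
--         "min_track_events_validation": acc[2],
--         "max_track_events_validation": acc[3],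
--     }
-- ===== Notes on version B (the rewrite author's own statement) =====
-- stated objective: alternative
-- what changed: Replaces the two intermediate comprehension-built lists and four separate min/max reductions with a single fused pass over the values that maintains running min/max accumulators and a counter; the empty case falls out of the still-None accumulator instead of a leading guard.
import Mathlib
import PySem

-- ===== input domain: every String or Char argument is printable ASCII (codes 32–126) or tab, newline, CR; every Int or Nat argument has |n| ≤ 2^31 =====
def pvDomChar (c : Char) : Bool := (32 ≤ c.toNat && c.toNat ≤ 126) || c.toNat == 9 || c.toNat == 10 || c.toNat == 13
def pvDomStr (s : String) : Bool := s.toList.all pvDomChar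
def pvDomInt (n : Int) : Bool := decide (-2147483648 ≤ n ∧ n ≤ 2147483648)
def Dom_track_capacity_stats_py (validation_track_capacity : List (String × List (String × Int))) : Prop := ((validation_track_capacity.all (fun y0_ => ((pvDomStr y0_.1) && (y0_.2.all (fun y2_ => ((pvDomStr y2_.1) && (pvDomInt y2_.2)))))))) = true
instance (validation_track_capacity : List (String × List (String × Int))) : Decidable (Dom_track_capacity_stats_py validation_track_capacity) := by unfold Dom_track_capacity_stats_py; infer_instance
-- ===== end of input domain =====

-- B fuses A's two comprehension lists and four min/max reductions into one pass with
-- running accumulators (objective: alternative decomposition, same complexity).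

-- int(cap.get("n_policy_docs_validation", 0)) — shared by both Pythons verbatim
def pvCapDocs (cap : List (String × Int)) : Int :=
  (PySem.Dict.ofList cap).getD "n_policy_docs_validation" 0
-- int(cap.get("n_events_validation", 0))
def pvCapEvents (cap : List (String × Int)) : Int :=
  (PySem.Dict.ofList cap).getD "n_events_validation" 0

-- ===== PORT A =====
def track_capacity_stats_py (validation_track_capacity : List (String × List (String × Int))) : List (String × Int) :=
  let d := PySem.Dict.ofList validation_track_capacity
  if d.size = 0 then
    [("n_tracks", 0), ("min_track_policy_docs_validation", 0), ("max_track_policy_docs_validation", 0),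
     ("min_track_events_validation", 0), ("max_track_events_validation", 0)]
  else
    let docs := d.values.map pvCapDocs
    let events := d.values.map pvCapEvents
    [("n_tracks", (d.size : Int)),
     ("min_track_policy_docs_validation", (PySem.List.min? docs (fun x => x)).getD 0),
     ("max_track_policy_docs_validation", (PySem.List.max? docs (fun x => x)).getD 0),
     ("min_track_events_validation", (PySem.List.min? events (fun x => x)).getD 0),
     ("max_track_events_validation", (PySem.List.max? events (fun x => x)).getD 0)]

-- ===== PORT B =====
-- one loop iteration of Source B: bump n, update (or initialise) the 4 running extrema
def pvStep (s : Int × Option (Int × Int × Int × Int)) (cap : List (String × Int)) :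
    Int × Option (Int × Int × Int × Int) :=
  let dv := pvCapDocs cap
  let ev := pvCapEvents cap
  match s.2 with
  | none => (s.1 + 1, some (dv, dv, ev, ev))
  | some (mnD, mxD, mnE, mxE) => (s.1 + 1, some (min mnD dv, max mxD dv, min mnE ev, max mxE ev))

def track_capacity_stats_py_alt (validation_track_capacity : List (String × List (String × Int))) : List (String × Int) :=
  let d := PySem.Dict.ofList validation_track_capacity
  match d.values.foldl pvStep (0, none) with
  | (_, none) =>
    [("n_tracks", 0), ("min_track_policy_docs_validation", 0), ("max_track_policy_docs_validation", 0),
     ("min_track_events_validation", 0), ("max_track_events_validation", 0)]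
  | (n, some (mnD, mxD, mnE, mxE)) =>
    [("n_tracks", n),
     ("min_track_policy_docs_validation", mnD),
     ("max_track_policy_docs_validation", mxD),
     ("min_track_events_validation", mnE),
     ("max_track_events_validation", mxE)]

-- ===== PRECONDITION & SPEC =====
def Spec_track_capacity_stats_py (validation_track_capacity : List (String × List (String × Int))) (out : List (String × Int)) : Prop := out = track_capacity_stats_py_alt validation_track_capacity
instance (validation_track_capacity : List (String × List (String × Int))) (out : List (String × Int)) : Decidable (Spec_track_capacity_stats_py validation_track_capacity out) := by unfold Spec_track_capacity_stats_py; infer_instance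

-- ===== CLAIM (what is proved, stated in full; the proofs are below) =====
def Claim_equal_track_capacity_stats_py : Prop := ∀ (validation_track_capacity : List (String × List (String × Int))), Dom_track_capacity_stats_py validation_track_capacity → Spec_track_capacity_stats_py validation_track_capacity (track_capacity_stats_py validation_track_capacity)

-- ===== LEMMAS AND PROOFS =====
-- the fused fold, started after the first element, computes length and the four running extrema
theorem pvStep_foldl (t : List (List (String × Int))) :
    ∀ (n a b c e : Int),
      t.foldl pvStep (n, some (a, b, c, e)) =
        (n + t.length,
         some ((t.map pvCapDocs).foldl min a, (t.map pvCapDocs).foldl max b,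
               (t.map pvCapEvents).foldl min c, (t.map pvCapEvents).foldl max e)) := by
  induction t with
  | nil => intro n a b c e; simp
  | cons h tl ih =>
    intro n a b c e
    simp only [List.foldl_cons, List.map_cons, pvStep]
    rw [ih]
    simp only [List.length_cons]
    congr 1
    push_cast
    ring

theorem track_capacity_stats_py_eq (vtc : List (String × List (String × Int))) :
    track_capacity_stats_py vtc = track_capacity_stats_py_alt vtc := by
  unfold track_capacity_stats_py track_capacity_stats_py_alt
  cases hvs : (PySem.Dict.ofList vtc).values with
  | nil =>
    have hsz : (PySem.Dict.ofList vtc).size = 0 := by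
      have := congrArg List.length hvs
      simpa [PySem.Dict.values, PySem.Dict.size] using this
    simp [hvs, hsz]
  | cons v t =>
    have hsz : (PySem.Dict.ofList vtc).size = t.length + 1 := by
      have := congrArg List.length hvs
      simpa [PySem.Dict.values, PySem.Dict.size] using this
    simp only [hvs, hsz, List.foldl_cons, List.map_cons, pvStep, PySem.List.min?_id_cons,
      PySem.List.max?_id_cons, Option.getD_some]
    rw [pvStep_foldl]
    simp
    push_cast
    ring

-- ===== VERDICT (by name: the statement is the Claim_ definition above) =====
theorem track_capacity_stats_py_spec : Claim_equal_track_capacity_stats_py := by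
  intro vtc _
  unfold Spec_track_capacity_stats_py
  exact track_capacity_stats_py_eq vtc
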